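-- pv_equiv track=rewrite | github.com/Gerardoicu/Ahorcado-Hanged | funciones.py | pintarLineas
-- ===== SOURCE A (Python) =====
-- def pintarLineas(lineas):
--   palabraSecreta=""
--   for i in lineas:
--     if i==" ":
--       palabraSecreta=palabraSecreta+" "
--     elif i==".":
--       palabraSecreta=palabraSecreta+"."
--     else:
--       palabraSecreta=palabraSecreta+"_"
--
--   return(palabraSecreta)
-- ===== SOURCE B (Python) =====
-- def pintarLineas(lineas):
--   palabras = lineas.split(" ")
--   return " ".join(
--     ".".join("_" * len(trozo) for trozo in palabra.split("."))
--     for palabra in palabras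
--   )
-- ===== Notes on version B (the rewrite author's own statement) =====
-- stated objective: faster
-- what changed: Instead of a per-character branch-and-concatenate loop, B splits the string on spaces and then on dots, replaces each separator-free chunk wholesale by a run of underscores of its length, and reassembles with join; the kept characters come from the separators reinserted by join, with no per-character Python-level loop.
import Mathlib
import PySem

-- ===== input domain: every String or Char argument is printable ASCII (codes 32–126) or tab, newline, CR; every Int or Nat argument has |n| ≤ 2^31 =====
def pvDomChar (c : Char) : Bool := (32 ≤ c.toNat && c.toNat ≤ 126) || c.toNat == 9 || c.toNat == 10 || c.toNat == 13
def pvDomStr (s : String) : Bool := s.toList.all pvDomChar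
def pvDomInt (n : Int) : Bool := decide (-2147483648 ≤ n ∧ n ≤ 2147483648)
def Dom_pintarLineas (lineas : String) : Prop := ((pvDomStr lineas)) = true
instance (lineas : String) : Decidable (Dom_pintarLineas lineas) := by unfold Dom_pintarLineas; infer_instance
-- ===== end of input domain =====

-- B replaces A's per-character branch-and-concatenate loop by split-on-space / split-on-dot,
-- masking each separator-free chunk wholesale with a run of underscores and reassembling with join.

-- ===== PORT A =====
-- A: builds palabraSecreta by appending " ", "." or "_" per character, in branch order.
def pintarLineas (lineas : String) : String :=
  String.mk (lineas.toList.foldl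
    (fun palabraSecreta i =>
      if i = ' ' then palabraSecreta ++ [' ']
      else if i = '.' then palabraSecreta ++ ['.']
      else palabraSecreta ++ ['_'])
    [])

-- ===== PORT B =====
-- B helper: ".".join("_" * len(trozo) for trozo in palabra.split("."))
def maskPalabra (palabra : List Char) : List Char :=
  PySem.Chars.join ['.']
    ((PySem.Chars.splitOn palabra ['.']).map (fun trozo => List.replicate trozo.length '_'))

-- B: " ".join(maskPalabra(palabra) for palabra in lineas.split(" "))
def pintarLineas_alt (lineas : String) : String :=
  String.mk (PySem.Chars.join [' ']
    ((PySem.Chars.splitOn lineas.toList [' ']).map maskPalabra))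

-- ===== PRECONDITION & SPEC =====
def Spec_pintarLineas (lineas : String) (out : String) : Prop := out = pintarLineas_alt lineas
instance (lineas : String) (out : String) : Decidable (Spec_pintarLineas lineas out) := by unfold Spec_pintarLineas; infer_instance

-- ===== CLAIM =====
def Claim_equal_pintarLineas : Prop := ∀ (lineas : String), Dom_pintarLineas lineas → Spec_pintarLineas lineas (pintarLineas lineas)

-- ===== LEMMAS AND PROOFS =====

-- Pure structural description of Python split on a single-character separator.
def splitc (c : Char) : List Char → List (List Char)
  | [] => [[]]
  | x :: r => if x = c then [] :: splitc c r else (splitc c r).modifyHead (x :: ·)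

theorem splitc_ne_nil (c : Char) (l : List Char) : splitc c l ≠ [] := by
  induction l with
  | nil => simp [splitc]
  | cons x r ih =>
    simp only [splitc]
    split_ifs
    · simp
    · cases h : splitc c r with
      | nil => exact absurd h ih
      | cons hd tl => simp [List.modifyHead]

theorem intersperse_flatten_cons {s : List Char} (a : Char) (h : List Char)
    (t : List (List Char)) :
    (List.intersperse s ((a :: h) :: t)).flatten
      = a :: (List.intersperse s (h :: t)).flatten := by
  cases t <;> simp [List.intersperse]

theorem splitOn_go_eq (c : Char) (fuel : Nat) (l cur : List Char)
    (acc : List (List Char)) (h : l.length < fuel) :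
    PySem.Chars.splitOn.go [c] fuel l cur acc
      = acc.reverse ++ ((cur.reverse ++ (splitc c l).headI) :: (splitc c l).tail) := by
  induction fuel generalizing l cur acc with
  | zero => omega
  | succ f ih =>
    cases l with
    | nil =>
      rw [PySem.Chars.splitOn.go.eq_def]
      simp [splitc]
    | cons x rest =>
      have hlen : rest.length < f := by simpa using h
      by_cases hx : x = c
      · subst hx
        rw [PySem.Chars.splitOn.go.eq_def]
        simp only [List.isPrefixOf, BEq.rfl, Bool.true_and, if_true,
          List.length_cons, List.drop_succ_cons, List.length_nil, List.drop_zero]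
        rw [ih rest [] (cur.reverse :: acc) hlen]
        cases hsp : splitc x rest with
        | nil => exact absurd hsp (splitc_ne_nil x rest)
        | cons hd tl => simp [splitc, hsp]
      · rw [PySem.Chars.splitOn.go.eq_def]
        have hpre : ([c].isPrefixOf (x :: rest)) = false := by
          simp [List.isPrefixOf, Ne.symm hx]
        simp only [hpre, Bool.false_eq_true, if_false]
        rw [ih rest (x :: cur) acc hlen]
        cases hsp : splitc c rest with
        | nil => exact absurd hsp (splitc_ne_nil c rest)
        | cons hd tl => simp [splitc, hx, hsp, List.modifyHead]

theorem splitOn_eq_splitc (c : Char) (l : List Char) :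
    PySem.Chars.splitOn l [c] = splitc c l := by
  rw [PySem.Chars.splitOn, splitOn_go_eq c (l.length + 1) l [] [] (by omega)]
  have hne := splitc_ne_nil c l
  cases hsp : splitc c l with
  | nil => exact absurd hsp hne
  | cons hd tl => simp

-- join [c] reinserts the separator: mapping g over each chunk and joining equals a
-- character-wise map that fixes c and applies g elsewhere.
theorem join_splitc_map (c : Char) (g : Char → Char) (l : List Char) :
    PySem.Chars.join [c] ((splitc c l).map (List.map g))
      = l.map (fun x => if x = c then c else g x) := by
  induction l with
  | nil => simp [splitc, PySem.Chars.join, List.intercalate]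
  | cons x r ih =>
    by_cases hx : x = c
    · subst hx
      simp only [splitc, if_true, List.map_cons, List.map_nil]
      cases hsp : splitc x r with
      | nil => exact absurd hsp (splitc_ne_nil x r)
      | cons hd tl =>
        rw [hsp] at ih
        simp only [PySem.Chars.join, List.intercalate, List.map_cons] at ih ⊢
        simp [List.intersperse, ih]
    · simp only [splitc, hx, if_false]
      cases hsp : splitc c r with
      | nil => exact absurd hsp (splitc_ne_nil c r)
      | cons hd tl =>
        rw [hsp] at ih
        simp only [List.modifyHead, List.map_cons]
        simp only [PySem.Chars.join, List.intercalate, List.map_cons] at ih ⊢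
        rw [intersperse_flatten_cons, ih]
        simp [hx]

theorem maskPalabra_eq (p : List Char) :
    maskPalabra p = p.map (fun x => if x = '.' then '.' else '_') := by
  unfold maskPalabra
  rw [splitOn_eq_splitc]
  have : ((splitc '.' p).map (fun trozo => List.replicate trozo.length '_'))
      = (splitc '.' p).map (List.map (fun _ => '_')) := by
    simp [List.map_const']
  rw [this, join_splitc_map]

theorem pintarLineas_alt_eq_map (lineas : String) :
    pintarLineas_alt lineas
      = String.mk (lineas.toList.map
          (fun x => if x = ' ' ∨ x = '.' then x else '_')) := by
  unfold pintarLineas_alt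
  rw [splitOn_eq_splitc]
  have hmap : (splitc ' ' lineas.toList).map maskPalabra
      = (splitc ' ' lineas.toList).map (List.map (fun x => if x = '.' then '.' else '_')) := by
    simp [maskPalabra_eq]
  rw [hmap, join_splitc_map]
  congr 1
  apply List.map_congr_left
  intro x _
  by_cases h1 : x = ' ' <;> by_cases h2 : x = '.' <;> simp [h1, h2]

theorem pintarLineas_foldl_eq (l : List Char) (acc : List Char) :
    l.foldl
      (fun palabraSecreta i =>
        if i = ' ' then palabraSecreta ++ [' ']
        else if i = '.' then palabraSecreta ++ ['.']
        else palabraSecreta ++ ['_'])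
      acc
    = acc ++ l.map (fun c => if c = ' ' ∨ c = '.' then c else '_') := by
  induction l generalizing acc with
  | nil => simp
  | cons c l ih =>
    simp only [List.foldl, List.map]
    rw [ih]
    by_cases h1 : c = ' '
    · simp [h1]
    · by_cases h2 : c = '.'
      · simp [h2]
      · simp [h1, h2]

-- ===== VERDICT =====
theorem pintarLineas_spec : Claim_equal_pintarLineas := by
  intro lineas _
  unfold Spec_pintarLineas pintarLineas
  rw [pintarLineas_alt_eq_map, pintarLineas_foldl_eq]
  simp
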